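-- pv_equiv track=rewrite | github.com/spattnaik1998/Research-Dashboard | backend/agents/dashboard_agent.py | _calculate_citation_trends
-- ===== SOURCE A (Python) =====
-- from typing import Dict, List, Any, Optional, Tuple
--
-- def _calculate_citation_trends(publications: List[Dict[str, Any]]) -> List[Dict[str, Any]]:
--     """
--     Calculate citation trends by year.
--
--     Args:
--         publications: List of publications
--
--     Returns:
--         List of citation counts by year
--     """
--     # Group citations by publication year
--     year_citations = {}
--     for pub in publications:
--         year = pub.get("year")
--         citations = pub.get("citations", 0)
--         if year:
--             if year not in year_citations:
--                 year_citations[year] = 0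
--             year_citations[year] += citations
--
--     # Convert to sorted list
--     trends = [
--         {"year": year, "citations": citations}
--         for year, citations in sorted(year_citations.items())
--     ]
--
--     return trends
-- ===== SOURCE B (Python) =====
-- def _calculate_citation_trends(publications):
--     # Sort the truthy-year records once, then merge adjacent equal-year runs.
--     pairs = sorted(
--         ((pub["year"], pub.get("citations", 0)) for pub in publications if pub.get("year")),
--         key=lambda t: t[0],
--     )
--     trends = []
--     for year, cits in pairs:
--         if trends and trends[-1]["year"] == year:
--             trends[-1]["citations"] += cits
--         else:
--             trends.append({"year": year, "citations": cits})
--     return trends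
-- ===== Notes on version B (the rewrite author's own statement) =====
-- stated objective: alternative
-- what changed: Replaces A's dict accumulation with membership test plus a final sort of the items by a filter, a single stable sort of the (year, citations) pairs, and an adjacent-run merge that sums consecutive equal-year records.
import Mathlib
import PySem

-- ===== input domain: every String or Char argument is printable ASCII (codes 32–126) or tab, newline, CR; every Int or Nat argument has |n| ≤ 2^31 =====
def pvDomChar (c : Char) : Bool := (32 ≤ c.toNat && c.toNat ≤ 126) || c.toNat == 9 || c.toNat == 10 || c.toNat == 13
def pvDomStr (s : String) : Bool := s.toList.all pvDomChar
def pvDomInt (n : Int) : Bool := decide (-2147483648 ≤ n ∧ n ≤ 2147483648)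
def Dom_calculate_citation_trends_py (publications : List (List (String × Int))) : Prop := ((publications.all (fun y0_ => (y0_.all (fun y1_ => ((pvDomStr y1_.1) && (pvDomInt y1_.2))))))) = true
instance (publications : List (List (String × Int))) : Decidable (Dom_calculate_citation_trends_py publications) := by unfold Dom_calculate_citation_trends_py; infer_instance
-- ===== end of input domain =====

-- B replaces A's dict accumulation (membership test + final sort of the items) by one stable
-- sort of the (year, citations) pairs followed by an adjacent-run merge; same cost, different structure.

-- ===== PORT A =====
def calculate_citation_trends_py (publications : List (List (String × Int))) : List (List (String × Int)) :=
  let year_citations : PySem.Dict Int Int := publications.foldl (fun d pub =>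
    let year := (PySem.Dict.mk pub).get? "year"
    let citations := (PySem.Dict.mk pub).getD "citations" 0
    match year with
    | some y =>
      if y ≠ 0 then
        let d' := if d.contains y = false then d.insert y 0 else d
        d'.insert y (d'.getD y 0 + citations)
      else d
    | none => d) PySem.Dict.empty
  -- sorted(year_citations.items()) sorts (year, citations) tuples lexicographically
  (PySem.List.sorted2 year_citations.items (fun p => p.1) (fun p => p.2)).map
    (fun p => [("year", p.1), ("citations", p.2)])

-- ===== PORT B =====
def calculate_citation_trends_py_alt (publications : List (List (String × Int))) : List (List (String × Int)) :=
  let pairs : List (Int × Int) := PySem.List.sorted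
    (publications.filterMap (fun pub =>
      match (PySem.Dict.mk pub).get? "year" with
      | some y => if y ≠ 0 then some (y, (PySem.Dict.mk pub).getD "citations" 0) else none
      | none => none))
    (fun t => t.1)
  pairs.foldl (fun trends p =>
    match trends.getLast? with
    | some last =>
      -- trends[-1]["year"]: every row built below contains "year", so the plain lookup is get? = some
      if ((PySem.Dict.mk last).get? "year" == some p.1) then
        trends.dropLast ++ [((PySem.Dict.mk last).modify "citations" 0 (· + p.2)).items]
      else trends ++ [[("year", p.1), ("citations", p.2)]]
    | none => [[("year", p.1), ("citations", p.2)]]) []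

-- ===== PRECONDITION & SPEC =====
def Spec_calculate_citation_trends_py (publications : List (List (String × Int))) (out : List (List (String × Int))) : Prop := out = calculate_citation_trends_py_alt publications
instance (publications : List (List (String × Int))) (out : List (List (String × Int))) : Decidable (Spec_calculate_citation_trends_py publications out) := by unfold Spec_calculate_citation_trends_py; infer_instance

-- ===== CLAIM (what is proved, stated in full; the proofs are below) =====
def Claim_equal_calculate_citation_trends_py : Prop := ∀ (publications : List (List (String × Int))), Dom_calculate_citation_trends_py publications → Spec_calculate_citation_trends_py publications (calculate_citation_trends_py publications)

-- ===== LEMMAS AND PROOFS =====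

-- the (year, citations) record both programs extract from one publication
def pvExtract (pub : List (String × Int)) : Option (Int × Int) :=
  match (PySem.Dict.mk pub).get? "year" with
  | some y => if y ≠ 0 then some (y, (PySem.Dict.mk pub).getD "citations" 0) else none
  | none => none

def pvRow (y c : Int) : List (String × Int) := [("year", y), ("citations", c)]

def pvSum (s : List (Int × Int)) (y : Int) : Int := ((s.filter (fun p => p.1 == y)).map (·.2)).sum

def pvGspec (y0 c0 : Int) : List (Int × Int) → List (List (String × Int))
  | [] => [pvRow y0 c0]
  | (y, c) :: t => if y == y0 then pvGspec y0 (c0 + c) t else pvRow y0 c0 :: pvGspec y c t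

def pvCanon (s : List (Int × Int)) : List (List (String × Int)) :=
  (PySem.List.dedup (s.map Prod.fst)).map (fun y => pvRow y (pvSum s y))

-- A's accumulation loop, with the redundant "insert 0 first" step collapsed
lemma pvA_loop_eq (publications : List (List (String × Int))) (d : PySem.Dict Int Int) :
    publications.foldl (fun d pub =>
      let year := (PySem.Dict.mk pub).get? "year"
      let citations := (PySem.Dict.mk pub).getD "citations" 0
      match year with
      | some y =>
        if y ≠ 0 then
          let d' := if d.contains y = false then d.insert y 0 else d
          d'.insert y (d'.getD y 0 + citations)
        else d
      | none => d) d
    = (publications.filterMap pvExtract).foldl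
        (fun d p => d.insert p.1 (d.getD p.1 0 + p.2)) d := by
  rw [List.foldl_filterMap]
  congr 1
  funext d pub
  simp only [pvExtract]
  match hx : (PySem.Dict.mk pub).get? "year" with
  | none => simp
  | some y =>
    by_cases hy : y = 0
    · simp [hy]
    · simp only [hy, ne_eq, not_false_iff, if_true]
      by_cases hc : (d.contains y : Bool) = true
      · simp [hc]
      · have hc' : d.contains y = false := by simpa using hc
        simp only [hc', if_true]
        rw [PySem.Dict.getD_insert_self, PySem.Dict.insert_insert_self,
            PySem.Dict.getD_of_not_contains _ _ hc']

lemma pvG_getD (l : List (Int × Int)) (d : PySem.Dict Int Int) (y : Int) :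
    (l.foldl (fun d p => d.insert p.1 (d.getD p.1 0 + p.2)) d).getD y 0
      = d.getD y 0 + pvSum l y := by
  induction l generalizing d with
  | nil => simp [pvSum]
  | cons p t ih =>
    simp only [List.foldl_cons, pvSum, List.filter_cons]
    rw [ih]
    by_cases hy : p.1 = y
    · simp [hy, pvSum]
      ring
    · simp [hy, PySem.Dict.getD_insert, Ne.symm hy, pvSum]

lemma pvG_items (l : List (Int × Int)) :
    (l.foldl (fun d p => d.insert p.1 (d.getD p.1 0 + p.2)) PySem.Dict.empty).items
      = (PySem.Set.ofList (l.map Prod.fst)).map (fun y => (y, pvSum l y)) := by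
  have hnd : (l.foldl (fun d p => d.insert p.1 (d.getD p.1 0 + p.2)) PySem.Dict.empty).keys.Nodup :=
    PySem.Dict.nodup_keys_foldl_insert_key l Prod.fst _ _ (by simp [PySem.Dict.keys_empty])
  have hkeys : (l.foldl (fun d p => d.insert p.1 (d.getD p.1 0 + p.2)) PySem.Dict.empty).keys
      = PySem.Set.ofList (l.map Prod.fst) := by
    rw [PySem.Dict.keys_foldl_insert_key l Prod.fst (fun d p => d.getD p.1 0 + p.2)]
    simp [PySem.Dict.keys_empty, PySem.Set.ofList_eq_foldl, PySem.Set.update]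
  rw [PySem.Dict.items_eq_map_keys _ hnd 0, hkeys]
  apply List.map_congr_left
  intro y _
  rw [pvG_getD]
  simp [PySem.Dict.getD_empty]

lemma pvInsertBy_congr {α : Type} (p q : α → α → Bool) (x : α) (ys : List α)
    (h : ∀ b ∈ ys, p x b = q x b) :
    PySem.List.insertBy p x ys = PySem.List.insertBy q x ys := by
  induction ys with
  | nil => rfl
  | cons y ys ih =>
    simp only [PySem.List.insertBy]
    rw [h y (by simp)]
    split
    · rfl
    · rw [ih (fun b hb => h b (by simp [hb]))]

lemma pvFoldl_insertBy_congr {α : Type} (p q : α → α → Bool) (xs acc : List α)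
    (h : ∀ a, (a ∈ acc ∨ a ∈ xs) → ∀ b, (b ∈ acc ∨ b ∈ xs) → p a b = q a b) :
    xs.foldl (fun acc x => PySem.List.insertBy p x acc)  acc
      = xs.foldl (fun acc x => PySem.List.insertBy q x acc) acc := by
  induction xs generalizing acc with
  | nil => rfl
  | cons x t ih =>
    simp only [List.foldl_cons]
    rw [pvInsertBy_congr p q x acc (fun b hb => h x (Or.inr (by simp)) b (Or.inl hb))]
    apply ih
    have hmem : ∀ c, c ∈ PySem.List.insertBy q x acc → c = x ∨ c ∈ acc :=
      fun c hc => (PySem.List.insertBy_mem_iff q x c acc).mp hc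
    have lift : ∀ c, (c ∈ PySem.List.insertBy q x acc ∨ c ∈ t) → (c ∈ acc ∨ c ∈ x :: t) := by
      intro c hc
      rcases hc with hc | hc
      · rcases hmem c hc with h' | h'
        · exact Or.inr (by simp [h'])
        · exact Or.inl h'
      · exact Or.inr (by simp [hc])
    intro a ha b hb
    exact h a (lift a ha) b (lift b hb)

-- when all first components are distinct, Python's lexicographic tuple sort is the key-only sort
lemma pvSorted2_eq_sorted_fst (xs : List (Int × Int)) (h : (xs.map Prod.fst).Nodup) :
    PySem.List.sorted2 xs (fun p => p.1) (fun p => p.2)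
      = PySem.List.sorted xs (fun p => p.1) := by
  have hinj := List.inj_on_of_nodup_map h
  rw [PySem.List.sorted_eq_foldl_insertBy]
  simp only [PySem.List.sorted2]
  apply pvFoldl_insertBy_congr
  intro a ha b hb
  have ha' : a ∈ xs := by rcases ha with h' | h' <;> simp_all
  have hb' : b ∈ xs := by rcases hb with h' | h' <;> simp_all
  rcases lt_trichotomy a.1 b.1 with hlt | heq | hgt
  · simp [hlt, not_lt_of_gt hlt]
  · have : a = b := hinj ha' hb' heq
    subst this
    simp
  · simp [hgt, not_lt_of_gt hgt]

-- B's merge loop, characterised against the recursive grouping pvGspec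
lemma pvB_fold_eq (l : List (Int × Int)) (acc : List (List (String × Int))) (y0 c0 : Int) :
    l.foldl (fun trends p =>
      match trends.getLast? with
      | some last =>
        if ((PySem.Dict.mk last).get? "year" == some p.1) then
          trends.dropLast ++ [((PySem.Dict.mk last).modify "citations" 0 (· + p.2)).items]
        else trends ++ [[("year", p.1), ("citations", p.2)]]
      | none => [[("year", p.1), ("citations", p.2)]]) (acc ++ [pvRow y0 c0])
    = acc ++ pvGspec y0 c0 l := by
  induction l generalizing acc y0 c0 with
  | nil => simp [pvGspec]
  | cons p t ih =>
    obtain ⟨y, c⟩ := p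
    simp only [List.foldl_cons, List.getLast?_concat]
    have hyq : ((PySem.Dict.mk (pvRow y0 c0)).get? "year" == some y) = (y0 == y) := by
      simp [pvRow, PySem.Dict.get?]
    have hmod : ((PySem.Dict.mk (pvRow y0 c0)).modify "citations" 0 (· + c)).items
        = pvRow y0 (c0 + c) := by
      simp [PySem.Dict.modify, PySem.Dict.insert, PySem.Dict.getD, PySem.Dict.get?, pvRow,
        PySem.Dict.contains]
    rw [hyq]
    by_cases hy : y = y0
    · subst hy
      simp only [beq_self_eq_true, if_true, List.dropLast_concat, hmod]
      rw [ih, pvGspec]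
      simp
    · have : (y0 == y) = false := by simp [Ne.symm hy]
      rw [this]
      simp only [Bool.false_eq_true, if_false, pvGspec]
      have : (y == y0) = false := by simp [hy]
      rw [this]
      simp only [Bool.false_eq_true, if_false]
      have := ih (acc ++ [pvRow y0 c0]) y c
      rw [List.append_assoc] at this ⊢
      simpa using this

lemma pvDedup_cons_dup (x : Int) (xs : List Int) :
    PySem.List.dedup (x :: x :: xs) = PySem.List.dedup (x :: xs) := by
  simp only [PySem.List.dedup_eq_ofList, PySem.Set.ofList_eq_foldl, List.foldl_cons]
  congr 1
  simp [PySem.Set.add]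

lemma pvUpdate_congr (xs : List Int) : ∀ (acc1 acc2 : List Int),
    (∀ y ∈ xs, PySem.Set.contains acc1 y = PySem.Set.contains acc2 y) →
    ∃ r, PySem.Set.update acc1 xs = acc1 ++ r ∧ PySem.Set.update acc2 xs = acc2 ++ r := by
  induction xs with
  | nil => exact fun acc1 acc2 _ => ⟨[], by simp [PySem.Set.update], by simp [PySem.Set.update]⟩
  | cons y t ih =>
    intro acc1 acc2 h
    have hy : PySem.Set.contains acc1 y = PySem.Set.contains acc2 y := h y (by simp)
    simp only [PySem.Set.update, List.foldl_cons, PySem.Set.add]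
    by_cases hc : PySem.Set.contains acc1 y = true
    · rw [if_pos hc, if_pos (hy ▸ hc)]
      exact ih acc1 acc2 (fun z hz => h z (by simp [hz]))
    · rw [if_neg hc, if_neg (fun hh => hc (hy ▸ hh))]
      obtain ⟨r, h1, h2⟩ := ih (acc1 ++ [y]) (acc2 ++ [y])
        (fun z hz => by
          have := h z (by simp [hz])
          simp only [PySem.Set.contains, List.contains_eq_mem, decide_eq_decide] at this
          simp [PySem.Set.contains, List.contains_eq_mem, this])
      exact ⟨y :: r, by simpa [PySem.Set.update] using h1, by simpa [PySem.Set.update] using h2⟩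

lemma pvDedup_cons_not_mem (x : Int) (xs : List Int) (h : x ∉ xs) :
    PySem.List.dedup (x :: xs) = x :: PySem.List.dedup xs := by
  obtain ⟨r, h1, h2⟩ := pvUpdate_congr xs [x] []
    (fun y hy => by simp [PySem.Set.contains, List.contains_eq_mem]; rintro rfl; exact h hy)
  simp only [PySem.Set.update] at h1 h2
  simp only [PySem.List.dedup_eq_ofList, PySem.Set.ofList_eq_foldl, List.foldl_cons]
  have hadd : PySem.Set.add ([] : List Int) x = [x] := by simp [PySem.Set.add, PySem.Set.contains]
  rw [hadd, h1]
  simp [h2]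

lemma pvSum_cons (p : Int × Int) (t : List (Int × Int)) (y : Int) :
    pvSum (p :: t) y = (if p.1 = y then p.2 else 0) + pvSum t y := by
  by_cases h : p.1 = y <;> simp [pvSum, h]

lemma pvGspec_eq_canon (t : List (Int × Int)) (y0 c0 : Int)
    (h : ((y0, c0) :: t).Pairwise (fun a b => a.1 ≤ b.1)) :
    pvGspec y0 c0 t = pvCanon ((y0, c0) :: t) := by
  induction t generalizing y0 c0 with
  | nil => simp [pvGspec, pvCanon, PySem.List.dedup_eq_ofList, PySem.Set.ofList_eq_foldl,
      PySem.Set.add, pvSum]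
  | cons p t ih =>
    obtain ⟨y, c⟩ := p
    rw [pvGspec]
    by_cases hy : y = y0
    · subst hy
      rw [if_pos (by simp)]
      have hpair : ((y, c0 + c) :: t).Pairwise (fun a b => a.1 ≤ b.1) := by
        rw [List.pairwise_cons] at h ⊢
        exact ⟨fun b hb => h.1 b (by simp [hb]), (List.pairwise_cons.mp h.2).2⟩
      rw [ih _ _ hpair]
      unfold pvCanon
      simp only [List.map_cons]
      rw [pvDedup_cons_dup]
      apply List.map_congr_left
      intro z hz
      have : pvSum ((y, c0) :: (y, c) :: t) z = pvSum ((y, c0 + c) :: t) z := by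
        by_cases hzy : y = z <;> simp [pvSum_cons, hzy] <;> ring
      rw [this]
    · rw [if_neg (by simp [hy])]
      have hyt : ∀ b ∈ (y, c) :: t, y0 ≤ b.1 := fun b hb => (List.pairwise_cons.mp h).1 b hb
      have hlt : y0 < y := lt_of_le_of_ne (hyt (y, c) (by simp)) (fun hh => hy hh.symm)
      have hnot : y0 ∉ ((y, c) :: t).map Prod.fst := by
        intro hmem
        simp only [List.mem_map] at hmem
        obtain ⟨b, hb, hb1⟩ := hmem
        have h1 := hyt b hb
        rcases (List.mem_cons.mp hb) with rfl | hb'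
        · exact hy hb1
        · have := (List.pairwise_cons.mp (List.pairwise_cons.mp h).2).1 b hb'
          omega
      rw [ih y c (List.pairwise_cons.mp h).2]
      unfold pvCanon
      have hsum0 : pvSum ((y, c) :: t) y0 = 0 := by
        have hfil : ((y, c) :: t).filter (fun p => p.1 == y0) = [] := by
          rw [List.filter_eq_nil_iff]
          intro b hb hbeq
          exact hnot (List.mem_map.mpr ⟨b, hb, by simpa using hbeq⟩)
        simp [pvSum, hfil]
      have hfst : ((y0, c0) :: (y, c) :: t).map Prod.fst = y0 :: ((y, c) :: t).map Prod.fst := rfl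
      rw [hfst, pvDedup_cons_not_mem _ _ hnot, List.map_cons]
      congr 1
      · have : pvSum ((y0, c0) :: (y, c) :: t) y0 = c0 := by
          rw [pvSum_cons, hsum0]; simp
        simp [this]
      · apply List.map_congr_left
        intro z hz
        have hzmem : z ∈ ((y, c) :: t).map Prod.fst :=
          (PySem.List.mem_dedup _ z).mp hz
        have hzne : y0 ≠ z := fun hh => hnot (hh ▸ hzmem)
        simp [pvSum_cons, hzne]

lemma pvUpdate_sublist {α : Type} [BEq α] (l acc : List α) :
    ∃ r, PySem.Set.update acc l = acc ++ r ∧ r.Sublist l := by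
  induction l generalizing acc with
  | nil => exact ⟨[], by simp [PySem.Set.update], by simp⟩
  | cons x xs ih =>
    simp only [PySem.Set.update, List.foldl_cons, PySem.Set.add]
    split
    · obtain ⟨r, hr, hs⟩ := ih acc
      exact ⟨r, by simpa [PySem.Set.update] using hr, hs.cons _⟩
    · obtain ⟨r, hr, hs⟩ := ih (acc ++ [x])
      refine ⟨x :: r, ?_, hs.cons₂ _⟩
      simp only [PySem.Set.update] at hr
      simp [hr]

lemma pvDedup_sublist {α : Type} [BEq α] (l : List α) :
    (PySem.List.dedup l).Sublist l := by
  obtain ⟨r, hr, hs⟩ := pvUpdate_sublist l []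
  simp only [PySem.Set.update, List.nil_append] at hr
  rw [PySem.List.dedup_eq_ofList, PySem.Set.ofList_eq_foldl, hr]
  exact hs

lemma pvCanon_sorted (ys : List (Int × Int)) :
    pvCanon (PySem.List.sorted ys (fun p => p.1))
      = (PySem.List.sorted (PySem.Set.ofList (ys.map Prod.fst)) (fun y => y)).map
          (fun y => pvRow y (pvSum ys y)) := by
  have hperm : (PySem.List.sorted ys (fun p => p.1)).Perm ys := PySem.List.sorted_perm ys _ false
  have hsum : ∀ y, pvSum (PySem.List.sorted ys (fun p => p.1)) y = pvSum ys y := by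
    intro y
    exact ((hperm.filter _).map _).sum_eq
  have hdedup : PySem.List.dedup ((PySem.List.sorted ys (fun p => p.1)).map Prod.fst)
      = PySem.List.sorted (PySem.Set.ofList (ys.map Prod.fst)) (fun y => y) := by
    symm
    apply PySem.List.sorted_eq_of_perm_of_pairwise_lt
    · rw [List.perm_ext_iff_of_nodup (PySem.List.nodup_dedup _) (PySem.Set.nodup_ofList _)]
      intro z
      rw [PySem.List.mem_dedup, PySem.Set.mem_ofList, List.mem_map, List.mem_map]
      constructor
      · rintro ⟨b, hb, rfl⟩; exact ⟨b, hperm.mem_iff.mp hb, rfl⟩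
      · rintro ⟨b, hb, rfl⟩; exact ⟨b, hperm.mem_iff.mpr hb, rfl⟩
    · have hle : ((PySem.List.sorted ys (fun p => p.1)).map Prod.fst).Pairwise (· ≤ ·) := by
        rw [List.pairwise_map]
        exact PySem.List.sorted_pairwise ys _
      have hle' := hle.sublist (pvDedup_sublist _)
      have hne : (PySem.List.dedup ((PySem.List.sorted ys (fun p => p.1)).map Prod.fst)).Pairwise (· ≠ ·) :=
        PySem.List.nodup_dedup _
      exact (hle'.and hne).imp (fun h => lt_of_le_of_ne h.1 h.2)
  unfold pvCanon
  rw [hdedup]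
  apply List.map_congr_left
  intro z _
  rw [hsum]

-- ===== VERDICT (by name: the statement is the Claim_ definition above) =====
theorem calculate_citation_trends_py_spec : Claim_equal_calculate_citation_trends_py := by
  intro publications _
  unfold Spec_calculate_citation_trends_py
  unfold calculate_citation_trends_py calculate_citation_trends_py_alt
  simp only []
  rw [pvA_loop_eq, pvG_items]
  set ys := publications.filterMap pvExtract with hys
  have hnd : (((PySem.Set.ofList (ys.map Prod.fst)).map (fun y => (y, pvSum ys y))).map Prod.fst).Nodup := by
    rw [List.map_map]
    have hid : (Prod.fst ∘ fun y => (y, pvSum ys y)) = id := rfl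
    rw [hid, List.map_id]
    exact PySem.Set.nodup_ofList _
  rw [pvSorted2_eq_sorted_fst _ hnd]
  have hsorted : PySem.List.sorted ((PySem.Set.ofList (ys.map Prod.fst)).map (fun y => (y, pvSum ys y))) (fun p => p.1)
      = (PySem.List.sorted (PySem.Set.ofList (ys.map Prod.fst)) (fun y => y)).map (fun y => (y, pvSum ys y)) := by
    apply PySem.List.sorted_eq_of_perm_of_pairwise_lt
    · exact (PySem.List.sorted_perm _ _ false).map _
    · rw [List.pairwise_map]
      exact PySem.List.sorted_ofList_pairwise_lt _
  rw [hsorted, List.map_map]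
  match hp : PySem.List.sorted ys (fun t => t.1) with
  | [] =>
    have hnil : ys = [] := (PySem.List.sorted_eq_nil_iff _ _ _).mp hp
    simp [hnil, PySem.Set.ofList_eq_foldl, PySem.List.sorted]
  | (y0, c0) :: t =>
    have h1 : pvGspec y0 c0 t = pvCanon ((y0, c0) :: t) := by
      apply pvGspec_eq_canon
      rw [← hp]
      exact PySem.List.sorted_pairwise ys _
    have h2 := pvB_fold_eq t [] y0 c0
    rw [List.nil_append] at h2
    rw [List.foldl_cons]
    refine Eq.trans ?_ h2.symm
    rw [h1, ← hp, pvCanon_sorted]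
    rfl
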